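-- pv_equiv track=rewrite | github.com/bemnet16/competitive-programming | 1310-xor-queries-of-a-subarray/1310-xor-queries-of-a-subarray.py | xorQueries
-- ===== SOURCE A (Python) =====
-- from typing import List
--
-- def xorQueries(arr: List[int], queries: List[List[int]]) -> List[int]:
--
--     pre_xor = [0]
--
--     for i in arr:
--         pre_xor.append(i ^ pre_xor[-1])
--
--
--     answer = []
--
--     for left, right in queries:
--
--         cur = pre_xor[right + 1] ^ pre_xor[left]
--         answer.append(cur)
--
--
--     return answer
-- ===== SOURCE B (Python) =====
-- from typing import List
--
-- def xorQueries(arr: List[int], queries: List[List[int]]) -> List[int]: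
--     answer = []
--     for left, right in queries:
--         cur = 0
--         for i in range(left, right + 1):
--             cur ^= arr[i]
--         answer.append(cur)
--     return answer
-- ===== Notes on version B (the rewrite author's own statement) =====
-- stated objective: simpler
-- what changed: Dropped the prefix-XOR table: B answers each query by directly scanning indices left..right and xor-accumulating arr[i], instead of precomputing prefix xors and differencing two table entries.
-- outside the precondition, e.g. on xorQueries([7], [[1, -1]]): A returns [7], B returns [0]; on xorQueries([1, 2], [[-1, 1]]): A returns [0], B returns [1]
import Mathlib
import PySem

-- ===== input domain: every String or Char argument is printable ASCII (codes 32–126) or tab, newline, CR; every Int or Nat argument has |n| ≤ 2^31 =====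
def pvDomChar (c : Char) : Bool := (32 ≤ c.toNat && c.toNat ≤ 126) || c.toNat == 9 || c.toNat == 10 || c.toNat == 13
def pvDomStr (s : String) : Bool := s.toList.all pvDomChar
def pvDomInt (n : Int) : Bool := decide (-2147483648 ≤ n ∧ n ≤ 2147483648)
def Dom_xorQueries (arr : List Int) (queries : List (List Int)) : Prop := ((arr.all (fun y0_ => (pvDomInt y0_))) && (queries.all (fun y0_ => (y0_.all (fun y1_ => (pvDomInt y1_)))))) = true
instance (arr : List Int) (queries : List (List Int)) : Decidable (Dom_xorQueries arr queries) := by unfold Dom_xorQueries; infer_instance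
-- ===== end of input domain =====

-- B replaces A's prefix-XOR table by a direct per-query xor loop over arr[left..right] (simpler, no table).

-- ===== PORT A =====
def xorQueries (arr : List Int) (queries : List (List Int)) : List Int :=
  let pre_xor := arr.foldl
    (fun pre i => pre ++ [PySem.Int.bxor i (PySem.List.pyGetD pre (-1) 0)]) [0]
  queries.foldl
    (fun answer q =>
      match q with
      | [left, right] =>
          answer ++ [PySem.Int.bxor (PySem.List.pyGetD pre_xor (right + 1) 0)
                                    (PySem.List.pyGetD pre_xor left 0)]
      | _ => answer)   -- Python raises on a query that is not a pair; excluded by Pre_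
    []

-- ===== PORT B =====
def xorQueries_alt (arr : List Int) (queries : List (List Int)) : List Int :=
  queries.foldl
    (fun answer q =>
      if q.length = 2 then   -- totalization guard: Python raises on a non-pair query (excluded by Pre_)
        let left := q.getD 0 0
        let right := q.getD 1 0
        answer ++ [(PySem.List.pyRange left (right + 1) 1).foldl
                     (fun cur i => PySem.Int.bxor cur (PySem.List.pyGetD arr i 0)) 0]
      else answer)
    []

-- ===== PRECONDITION & SPEC =====
-- Pre_ restricts queries to well-formed [left, right] pairs with 0 <= left <= right + 1 <= len(arr)
-- (the problem's contract plus harmless empty ranges): outside it A either raises (wrong arity,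
-- index beyond the wrap range) or returns accidental values of its prefix table (negative-index
-- wraparound, inverted left > right + 1 ranges), which no caller of this contract can rely on.
def Pre_xorQueries (arr : List Int) (queries : List (List Int)) : Prop :=
  (queries.all fun q => decide (q.length = 2 ∧ 0 ≤ q.getD 0 0 ∧
    q.getD 0 0 ≤ q.getD 1 0 + 1 ∧ q.getD 1 0 < (arr.length : Int))) = true

instance (arr : List Int) (queries : List (List Int)) : Decidable (Pre_xorQueries arr queries) := by
  unfold Pre_xorQueries; infer_instance

def pvWitness_xorQueries : List Int × List (List Int) :=
  ([3, 1, 4, 1, 5, 9, 2, 6, 5], [[1, 5], [2, 4], [1, 1], [3, 6], [2, 7], [5, 6], [2, 2], [1, 6]])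

def Spec_xorQueries (arr : List Int) (queries : List (List Int)) (out : List Int) : Prop :=
  out = xorQueries_alt arr queries
instance (arr : List Int) (queries : List (List Int)) (out : List Int) :
    Decidable (Spec_xorQueries arr queries out) := by unfold Spec_xorQueries; infer_instance

-- ===== CLAIM (what is proved, stated in full; the proofs are below) =====
def Claim_equal_xorQueries : Prop := ∀ (arr : List Int) (queries : List (List Int)),
  Dom_xorQueries arr queries → Pre_xorQueries arr queries →
  Spec_xorQueries arr queries (xorQueries arr queries)

-- ===== LEMMAS AND PROOFS =====

-- bxor on the constructor shapes of Int
theorem pv_bxor_ns (x y : Nat) :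
    PySem.Int.bxor (x : Int) (Int.negSucc y) = Int.negSucc (x ^^^ y) := by
  simp [PySem.Int.bxor, Int.negSucc_eq]
  rw [if_neg (by omega)]
  omega

theorem pv_bxor_sn (x y : Nat) :
    PySem.Int.bxor (Int.negSucc x) (y : Int) = Int.negSucc (x ^^^ y) := by
  simp [PySem.Int.bxor, Int.negSucc_eq]
  rw [if_neg (by omega)]
  omega

theorem pv_bxor_ss (x y : Nat) :
    PySem.Int.bxor (Int.negSucc x) (Int.negSucc y) = ((x ^^^ y : Nat) : Int) := by
  simp [PySem.Int.bxor, Int.negSucc_eq]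
  omega

theorem pv_bxor_assoc (a b c : Int) :
    PySem.Int.bxor (PySem.Int.bxor a b) c = PySem.Int.bxor a (PySem.Int.bxor b c) := by
  cases a <;> cases b <;> cases c <;>
    simp [pv_bxor_ns, pv_bxor_sn, pv_bxor_ss, Nat.xor_assoc]

theorem pv_zero_bxor (a : Int) : PySem.Int.bxor 0 a = a := by
  rw [PySem.Int.bxor_comm]; exact PySem.Int.bxor_zero a

-- the tail of A's prefix-xor table, starting from accumulator c
def pvPxor : List Int → Int → List Int
  | [], _ => []
  | i :: t, c => PySem.Int.bxor i c :: pvPxor t (PySem.Int.bxor i c)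

theorem pv_buildA (arr : List Int) :
    ∀ (acc : List Int) (c : Int),
    arr.foldl (fun pre i => pre ++ [PySem.Int.bxor i (PySem.List.pyGetD pre (-1) 0)]) (acc ++ [c])
      = (acc ++ [c]) ++ pvPxor arr c := by
  induction arr with
  | nil => intro acc c; simp [pvPxor]
  | cons i t ih =>
      intro acc c
      simp only [List.foldl_cons, PySem.List.pyGetD_neg_one_append_singleton, pvPxor]
      have := ih (acc ++ [c]) (PySem.Int.bxor i c)
      simpa [List.append_assoc] using this

-- entry k of the table headed by c is the xor-prefix fold of the first k elements
theorem pv_getD_pxor (arr : List Int) :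
    ∀ (c : Int) (k : Nat), k ≤ arr.length →
    (c :: pvPxor arr c).getD k 0
      = (arr.take k).foldl (fun s i => PySem.Int.bxor i s) c := by
  induction arr with
  | nil =>
      intro c k hk
      have hk0 : k = 0 := by simpa using hk
      subst hk0; simp
  | cons i t ih =>
      intro c k hk
      cases k with
      | zero => simp
      | succ k =>
          simp only [pvPxor, List.getD_cons_succ, List.take_succ_cons, List.foldl_cons]
          exact ih (PySem.Int.bxor i c) k (by simpa using hk)

-- fold of xor with a shifted accumulator
theorem pv_foldl_bxor_shift (b : List Int) :
    ∀ (c d : Int),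
    b.foldl (fun s i => PySem.Int.bxor s i) (PySem.Int.bxor c d)
      = PySem.Int.bxor c (b.foldl (fun s i => PySem.Int.bxor s i) d) := by
  induction b with
  | nil => intro c d; rfl
  | cons x t ih =>
      intro c d
      simp only [List.foldl_cons, pv_bxor_assoc]
      exact ih c (PySem.Int.bxor d x)

theorem pv_foldl_orient (b : List Int) (c : Int) :
    b.foldl (fun s i => PySem.Int.bxor i s) c = b.foldl (fun s i => PySem.Int.bxor s i) c :=
  PySem.List.foldl_congr_mem (init := c) (h := fun acc x _ => PySem.Int.bxor_comm x acc)

theorem pv_cancel (b : List Int) (X : Int) :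
    PySem.Int.bxor (b.foldl (fun s i => PySem.Int.bxor s i) X) X
      = b.foldl (fun s i => PySem.Int.bxor s i) 0 := by
  have h : b.foldl (fun s i => PySem.Int.bxor s i) X
      = PySem.Int.bxor X (b.foldl (fun s i => PySem.Int.bxor s i) 0) := by
    have := pv_foldl_bxor_shift b X 0
    simpa [PySem.Int.bxor_zero] using this
  rw [h, PySem.Int.bxor_comm, ← pv_bxor_assoc, PySem.Int.bxor_self]
  exact pv_zero_bxor _

-- the values arr[left], …, arr[right] that B's inner loop visits, as a sublist
theorem pv_range_map (arr : List Int) (a b : Int) (h0 : 0 ≤ a) (hb : b ≤ (arr.length : Int)) :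
    (PySem.List.pyRange a b 1).map (fun j => PySem.List.pyGetD arr j 0)
      = (arr.drop a.toNat).take (b.toNat - a.toNat) := by
  rw [PySem.List.pyRange_one, List.map_map]
  apply List.ext_getElem
  · simp
    omega
  · intro k hk1 hk2
    simp only [List.getElem_map, Function.comp_apply, List.getElem_range]
    have hak : 0 ≤ a + (k : Int) := by omega
    have hlt : a + (k : Int) < (arr.length : Int) := by
      simp at hk1
      omega
    rw [PySem.List.pyGetD_eq_getElem arr 0 hak hlt]
    rw [List.getElem_take, List.getElem_drop]
    congr 1
    omega

-- the per-query value: prefix-difference = direct index-loop fold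
theorem pv_query (arr : List Int) (l r : Int) (h0 : 0 ≤ l) (hlr : l ≤ r + 1)
    (hr : r < (arr.length : Int)) :
    PySem.Int.bxor (PySem.List.pyGetD (0 :: pvPxor arr 0) (r + 1) 0)
                   (PySem.List.pyGetD (0 :: pvPxor arr 0) l 0)
      = (PySem.List.pyRange l (r + 1) 1).foldl
          (fun cur i => PySem.Int.bxor cur (PySem.List.pyGetD arr i 0)) 0 := by
  obtain ⟨L, rfl⟩ : ∃ L : Nat, l = (L : Int) := ⟨l.toNat, by omega⟩
  obtain ⟨R1, hR1⟩ : ∃ R1 : Nat, r + 1 = (R1 : Int) := ⟨(r + 1).toNat, by omega⟩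
  rw [hR1, PySem.List.pyGetD_natCast, PySem.List.pyGetD_natCast]
  have hLlen : L ≤ arr.length := by omega
  have hR1len : R1 ≤ arr.length := by omega
  have hLR1 : L ≤ R1 := by omega
  rw [pv_getD_pxor arr 0 R1 hR1len, pv_getD_pxor arr 0 L hLlen]
  have hmap := pv_range_map arr L R1 (Int.natCast_nonneg L) (by omega)
  simp only [Int.toNat_natCast] at hmap
  have hfold : (PySem.List.pyRange (L : Int) (R1 : Int) 1).foldl
      (fun cur i => PySem.Int.bxor cur (PySem.List.pyGetD arr i 0)) 0
      = ((arr.drop L).take (R1 - L)).foldl (fun cur x => PySem.Int.bxor cur x) 0 := by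
    rw [← hmap, List.foldl_map]
  rw [hfold]
  rw [pv_foldl_orient, pv_foldl_orient]
  have hsplit : arr.take R1 = arr.take L ++ (arr.drop L).take (R1 - L) := by
    rw [← List.take_add]
    congr 1
    omega
  rw [hsplit, List.foldl_append]
  simpa using pv_cancel ((arr.drop L).take (R1 - L)) _

-- ===== VERDICT (by name: the statement is the Claim_ definition above) =====
theorem xorQueries_spec : Claim_equal_xorQueries := by
  intro arr queries _ hpre
  unfold Spec_xorQueries xorQueries xorQueries_alt
  have hbuild : arr.foldl
      (fun pre i => pre ++ [PySem.Int.bxor i (PySem.List.pyGetD pre (-1) 0)]) [0]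
      = 0 :: pvPxor arr 0 := by
    have := pv_buildA arr [] 0
    simpa using this
  simp only [hbuild]
  apply PySem.List.foldl_congr_mem
  intro acc q hq
  have hq' := (List.all_eq_true.mp hpre) q hq
  simp only [decide_eq_true_eq] at hq'
  obtain ⟨hlen, h0, hle, hr⟩ := hq'
  match q, hlen with
  | [l, r], _ =>
      simp only [List.getD_cons_zero, List.getD_cons_succ] at h0 hle hr
      simp [pv_query arr l r h0 hle hr]
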